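-- pv_equiv track=rewrite | github.com/shamashel/yuyuko-dhamma-study | tools/swarm/analyze_translations.py | analyze_consensus
-- ===== SOURCE A (Python) =====
-- from collections import defaultdict
-- from typing import Dict, List, Tuple
--
-- def analyze_consensus(all_terms: Dict[str, Dict[str, str]]) -> Tuple[Dict[str, List[str]], Dict[str, List[str]]]:
--     """
--     Analyze which terms have high consensus vs high variance.
--
--     Returns:
--         (consensus_terms, variance_terms)
--     """
--     # Collect all translations for each Pali term
--     term_translations = defaultdict(list)
--
--     for lens, terms in all_terms.items():
--         for pali_term, translation in terms.items():
--             term_translations[pali_term].append((lens, translation))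
--
--     # Calculate consensus for each term
--     consensus = {}  # term -> list of (translation, count)
--     variance = {}
--
--     for term, translations in term_translations.items():
--         # Normalize translations for comparison
--         normalized = defaultdict(list)
--         for lens, trans in translations:
--             # Normalize: lowercase, remove articles, etc.
--             key = trans.lower().replace('the ', '').replace('a ', '').strip()
--             normalized[key].append((lens, trans))
--
--         # If one translation dominates (4+ of 6), it's consensus
--         max_count = max(len(v) for v in normalized.values())
--
--         if max_count >= 4:
--             # High consensus
--             consensus[term] = translations
--         else:
--             # High variance
--             variance[term] = translations
--
--     return consensus, variance
-- ===== SOURCE B (Python) =====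
-- def analyze_consensus(all_terms):
--     """
--     Analyze which terms have high consensus vs high variance.
--
--     Flattens everything into a list of (pali, lens, translation) triples,
--     counts (pali, normalized-translation) pairs globally with one Counter,
--     derives the set of consensus terms (some pair count >= 4), and routes
--     each triple directly into the right output dict in one final pass.
--     """
--     triples = [(pali, lens, trans)
--                for lens, terms in all_terms.items()
--                for pali, trans in terms.items()]
--
--     from collections import Counter
--     key_counts = Counter(
--         (pali, trans.lower().replace('the ', '').replace('a ', '').strip())
--         for pali, _lens, trans in triples)
--
--     consensus_set = {pali for (pali, _key), c in key_counts.items() if c >= 4}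
--
--     consensus, variance = {}, {}
--     for pali, lens, trans in triples:
--         target = consensus if pali in consensus_set else variance
--         target.setdefault(pali, []).append((lens, trans))
--     return consensus, variance
-- ===== Notes on version B (the rewrite author's own statement) =====
-- stated objective: alternative
-- what changed: B flattens the nested dicts into one list of (term, lens, translation) triples, builds a single global Counter of (term, normalized-translation) pairs, derives the consensus-term set by an existential count>=4 test over that counter's items, and routes each triple directly into the consensus or variance dict in one final pass -- no per-term grouping dict and no max computation.
import Mathlib
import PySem

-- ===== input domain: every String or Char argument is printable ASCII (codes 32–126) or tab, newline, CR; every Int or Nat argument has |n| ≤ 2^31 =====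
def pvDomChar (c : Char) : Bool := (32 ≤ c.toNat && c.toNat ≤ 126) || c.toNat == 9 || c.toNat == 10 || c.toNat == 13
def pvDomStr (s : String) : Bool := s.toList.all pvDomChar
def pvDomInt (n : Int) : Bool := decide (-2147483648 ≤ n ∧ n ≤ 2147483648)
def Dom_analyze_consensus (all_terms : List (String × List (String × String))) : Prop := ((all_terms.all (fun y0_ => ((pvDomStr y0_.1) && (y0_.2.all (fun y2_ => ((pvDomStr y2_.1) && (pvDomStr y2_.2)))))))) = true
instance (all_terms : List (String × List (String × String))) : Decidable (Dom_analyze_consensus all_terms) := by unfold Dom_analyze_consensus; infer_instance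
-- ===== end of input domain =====

-- B flattens to (term, lens, translation) triples, builds one global counter of (term, normalized-translation) pairs, derives the consensus-term set by an existential count>=4 test, and routes triples straight into the two output dicts; alternative decomposition, same cost.


-- shared normalization helper: trans.lower().replace('the ', '').replace('a ', '').strip()
def pvNormKey (t : String) : String :=
  PySem.Str.strip (PySem.Str.replace (PySem.Str.replace (PySem.Str.lower t) "the " "") "a " "")

-- max(len(v) for v in …): the value lists are nonempty on every reachable collection,
-- so the .getD 0 default is never consulted.
def pvMaxInt (vals : List Int) : Int :=
  (PySem.List.max? vals (fun x => x)).getD 0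

-- ===== PORT A =====
def analyze_consensus (all_terms : List (String × List (String × String))) : (List (String × List (String × String))) × (List (String × List (String × String))) :=
  -- pass 1: term_translations[pali_term].append((lens, translation))
  let term_translations : PySem.Dict String (List (String × String)) :=
    all_terms.foldl (fun d p =>
      p.2.foldl (fun d q => d.modify q.1 [] (fun v => v ++ [(p.1, q.2)])) d) PySem.Dict.empty
  -- pass 2: per term, group translations by normalized key, then test the dominant count
  let res : PySem.Dict String (List (String × String)) × PySem.Dict String (List (String × String)) :=
    term_translations.items.foldl (fun acc p =>
      let normalized : PySem.Dict String (List (String × String)) :=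
        p.2.foldl (fun n q => n.modify (pvNormKey q.2) [] (fun v => v ++ [(q.1, q.2)])) PySem.Dict.empty
      let max_count : Int := pvMaxInt (normalized.values.map (fun v => PySem.List.len v))
      if 4 ≤ max_count then (acc.1.insert p.1 p.2, acc.2) else (acc.1, acc.2.insert p.1 p.2))
      (PySem.Dict.empty, PySem.Dict.empty)
  (res.1.items, res.2.items)

-- ===== PORT B =====
def analyze_consensus_alt (all_terms : List (String × List (String × String))) : (List (String × List (String × String))) × (List (String × List (String × String))) :=
  -- triples = [(pali, lens, trans) for lens, terms in all_terms.items() for pali, trans in terms.items()]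
  let triples : List (String × String × String) :=
    all_terms.flatMap (fun p => p.2.map (fun q => (q.1, p.1, q.2)))
  -- key_counts = Counter((pali, normalize(trans)) for pali, _lens, trans in triples)
  let key_counts : PySem.Dict (String × String) Int :=
    PySem.Dict.counter (triples.map (fun r => (r.1, pvNormKey r.2.2)))
  -- consensus_set = {pali for (pali, _key), c in key_counts.items() if c >= 4}
  let consensus_set : PySem.Set String :=
    key_counts.items.foldl (fun s p => if 4 ≤ p.2 then PySem.Set.add s p.1.1 else s) PySem.Set.empty
  -- routing pass: each triple goes straight into consensus or variance
  let res : PySem.Dict String (List (String × String)) × PySem.Dict String (List (String × String)) :=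
    triples.foldl (fun acc r =>
      if PySem.Set.contains consensus_set r.1 then
        (acc.1.modify r.1 [] (fun v => v ++ [r.2]), acc.2)
      else
        (acc.1, acc.2.modify r.1 [] (fun v => v ++ [r.2])))
      (PySem.Dict.empty, PySem.Dict.empty)
  (res.1.items, res.2.items)

-- ===== PRECONDITION & SPEC =====
def Spec_analyze_consensus (all_terms : List (String × List (String × String))) (out : (List (String × List (String × String))) × (List (String × List (String × String)))) : Prop := out = analyze_consensus_alt all_terms
instance (all_terms : List (String × List (String × String))) (out : (List (String × List (String × String))) × (List (String × List (String × String)))) : Decidable (Spec_analyze_consensus all_terms out) := by unfold Spec_analyze_consensus; infer_instance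

-- ===== CLAIM =====
def Claim_equal_analyze_consensus : Prop := ∀ (all_terms : List (String × List (String × String))), Dom_analyze_consensus all_terms → Spec_analyze_consensus all_terms (analyze_consensus all_terms)

-- ===== LEMMAS AND PROOFS =====

-- grouping of a flat (key, value) list, the shape both programs’ collection loops share
def pvGroup {κ ν : Type} [BEq κ] (l : List (κ × ν)) : PySem.Dict κ (List ν) :=
  l.foldl (fun d r => d.modify r.1 [] (fun v => v ++ [r.2])) PySem.Dict.empty

-- A's nested pass-1 loop is the grouping of B's flattened triple list
lemma pvGroupFlat (all_terms : List (String × List (String × String))) :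
    all_terms.foldl (fun d p =>
        p.2.foldl (fun d q => d.modify q.1 [] (fun v => v ++ [(p.1, q.2)])) d) PySem.Dict.empty
      = pvGroup (all_terms.flatMap (fun p => p.2.map (fun q => (q.1, p.1, q.2)))) := by
  unfold pvGroup
  induction all_terms using List.reverseRecOn with
  | nil => rfl
  | append_singleton l p ih =>
    rw [List.flatMap_append, List.foldl_append, List.foldl_append, ← ih]
    simp [List.foldl_map]

-- a fold routing each element into one of two accumulators is two folds over filtered lists
lemma pvRouteSplit {α β γ : Type} (c : α → Prop) [DecidablePred c]
    (f : β → α → β) (g : γ → α → γ) (l : List α) (a : β) (b : γ) :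
    l.foldl (fun acc r => if c r then (f acc.1 r, acc.2) else (acc.1, g acc.2 r)) (a, b)
      = ((l.filter (fun r => decide (c r))).foldl f a,
         (l.filter (fun r => !decide (c r))).foldl g b) := by
  induction l generalizing a b with
  | nil => rfl
  | cons x l ih =>
    simp only [List.foldl_cons, List.filter_cons]
    by_cases h : c x <;> simp [h, ih]

-- 4 ≤ max(vals) iff some value reaches 4 (an empty list gives max 0)
lemma pvMaxGe (vals : List Int) : 4 ≤ pvMaxInt vals ↔ ∃ v ∈ vals, 4 ≤ v := by
  unfold pvMaxInt
  cases h : PySem.List.max? vals (fun x => x) with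
  | none =>
    rw [PySem.List.max?_eq_none_iff] at h
    subst h; simp
  | some m =>
    simp only [Option.getD_some]
    constructor
    · intro h4; exact ⟨m, PySem.List.max?_mem h, h4⟩
    · rintro ⟨v, hv, h4⟩; exact le_trans h4 (PySem.List.max?_isMax h v hv)

-- A's per-term grouping lengths ARE the counter values of the normalized keys, in the same order
lemma pvValsEq (m : List (String × String)) :
    ((m.foldl (fun n q => n.modify (pvNormKey q.2) [] (fun v => v ++ [(q.1, q.2)])) PySem.Dict.empty).values.map (fun v => PySem.List.len v))
      = (PySem.Dict.counter (m.map (fun r => pvNormKey r.2))).values := by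
  have hfold : (m.foldl (fun n q => n.modify (pvNormKey q.2) [] (fun v => v ++ [(q.1, q.2)])) PySem.Dict.empty)
      = ((m.map (fun q => (pvNormKey q.2, (q.1, q.2)))).foldl
          (fun d r => d.modify r.1 [] (fun v => v ++ [r.2])) PySem.Dict.empty) :=
    by rw [List.foldl_map]
  rw [hfold]
  have hnodup : ((m.map (fun q => (pvNormKey q.2, (q.1, q.2)))).foldl
      (fun d r => d.modify r.1 [] (fun v => v ++ [r.2])) PySem.Dict.empty).keys.Nodup :=
    PySem.Dict.nodup_keys_foldl_modify_key (m.map (fun q => (pvNormKey q.2, (q.1, q.2))))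
      (fun r => r.1) [] (fun _ r => (fun v => v ++ [r.2]))
      PySem.Dict.empty (by simp [PySem.Dict.keys_empty])
  rw [PySem.Dict.values_eq_map_keys _ hnodup []]
  rw [PySem.Dict.keys_foldl_modify_key]
  have hks : ((m.map (fun q => (pvNormKey q.2, (q.1, q.2)))).map (fun r => r.1))
      = m.map (fun r => pvNormKey r.2) := by
    simp [List.map_map, Function.comp]
  rw [PySem.Dict.keys_empty, PySem.Set.update_nil_left, hks]
  have hrhs : (PySem.Dict.counter (m.map (fun r => pvNormKey r.2))).values
      = (PySem.Set.ofList (m.map (fun r => pvNormKey r.2))).map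
          (fun k => ((m.map (fun r => pvNormKey r.2)).count k : Int)) := by
    simp only [PySem.Dict.values, PySem.Dict.items_counter, List.map_map]
    rfl
  rw [hrhs, List.map_map]
  apply List.map_congr_left
  intro k _
  simp only [Function.comp_apply]
  rw [PySem.Dict.getD_foldl_modify_append]
  simp only [PySem.Dict.getD_empty, List.nil_append, PySem.List.len_eq, List.length_map]
  simp [List.filter_map, List.count_eq_countP, Function.comp_def, List.countP_eq_length_filter]

-- set(xs) commutes with filtering
lemma pvOfListFilter {α : Type} [BEq α] [LawfulBEq α] (P : α → Bool) (xs : List α) :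
    PySem.Set.ofList (xs.filter P) = (PySem.Set.ofList xs).filter P := by
  induction xs using List.reverseRecOn with
  | nil => rfl
  | append_singleton xs x ih =>
    by_cases hP : P x
    · rw [List.filter_append, show List.filter P [x] = [x] by simp [hP],
          PySem.Set.ofList_append_singleton, PySem.Set.ofList_append_singleton,
          PySem.Set.add_eq_ite, PySem.Set.add_eq_ite, ih]
      by_cases hx : x ∈ xs
      · have h1 : x ∈ PySem.Set.ofList xs := (PySem.Set.mem_ofList _ _).mpr hx
        have h2 : x ∈ (PySem.Set.ofList xs).filter P := List.mem_filter.mpr ⟨h1, hP⟩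
        simp [h1, h2]
      · have h1 : x ∉ PySem.Set.ofList xs := fun h => hx ((PySem.Set.mem_ofList _ _).mp h)
        have h2 : x ∉ (PySem.Set.ofList xs).filter P := fun h => h1 (List.mem_filter.mp h).1
        simp [h1, h2, List.filter_append, hP]
    · rw [List.filter_append, show List.filter P [x] = [] by simp [hP], List.append_nil,
          PySem.Set.ofList_append_singleton, PySem.Set.add_eq_ite, ih]
      by_cases hx : x ∈ PySem.Set.ofList xs
      · simp [hx]
      · simp [hx, List.filter_append, hP]

lemma pvGroupKeys {κ ν : Type} [BEq κ] [LawfulBEq κ] (l : List (κ × ν)) :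
    (pvGroup l).keys = PySem.Set.ofList (l.map Prod.fst) := by
  unfold pvGroup
  rw [PySem.Dict.keys_foldl_modify_key l (fun r => r.1) [] (fun _ r => (fun v => v ++ [r.2]))]
  rw [PySem.Dict.keys_empty, PySem.Set.update_nil_left]

lemma pvGroupNodup {κ ν : Type} [BEq κ] [LawfulBEq κ] (l : List (κ × ν)) :
    (pvGroup l).keys.Nodup := by
  rw [pvGroupKeys]; exact PySem.Set.nodup_ofList _

-- the collected list of a key that survives the filter is unchanged by the filter
lemma pvGroupGetDFilter {κ ν : Type} [BEq κ] [LawfulBEq κ] (P : κ → Bool) (l : List (κ × ν))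
    (k : κ) (hk : P k = true) :
    (pvGroup (l.filter (fun r => P r.1))).getD k [] = (pvGroup l).getD k [] := by
  unfold pvGroup
  rw [PySem.Dict.getD_foldl_modify_append, PySem.Dict.getD_foldl_modify_append]
  rw [List.filter_filter]
  congr 1
  apply congrArg
  apply List.filter_congr
  intro r _
  by_cases h : r.1 = k
  · simp [h, hk]
  · simp [h]

-- grouping a key-filtered list = filtering the grouped items by key
lemma pvGroupFilterItems {κ ν : Type} [BEq κ] [LawfulBEq κ] (P : κ → Bool) (l : List (κ × ν)) :
    (pvGroup (l.filter (fun r => P r.1))).items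
      = (pvGroup l).items.filter (fun q => P q.1) := by
  rw [PySem.Dict.items_eq_map_keys _ (pvGroupNodup _) [],
      PySem.Dict.items_eq_map_keys _ (pvGroupNodup l) []]
  rw [pvGroupKeys, pvGroupKeys]
  have hmf : (l.filter (fun r => P r.1)).map Prod.fst = (l.map Prod.fst).filter P := by
    rw [List.filter_map]; rfl
  rw [hmf, pvOfListFilter, List.filter_map]
  have hcomp : ((fun q : κ × List ν => P q.1) ∘ (fun k => (k, (pvGroup l).getD k []))) = P := by
    funext k; rfl
  rw [hcomp]
  apply List.map_congr_left
  intro k hk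
  have hPk : P k = true := (List.mem_filter.mp hk).2
  rw [pvGroupGetDFilter P l k hPk]

-- membership in B's consensus set ↔ some normalized translation of the term occurs ≥ 4 times
lemma pvConsensusSetMem (triples : List (String × String × String)) (t : String) :
    t ∈ ((PySem.Dict.counter (triples.map (fun r => (r.1, pvNormKey r.2.2)))).items.foldl
          (fun s p => if 4 ≤ p.2 then PySem.Set.add s p.1.1 else s) PySem.Set.empty)
      ↔ ∃ k ∈ (PySem.Dict.counter (triples.map (fun r => (r.1, pvNormKey r.2.2)))).items,
          4 ≤ k.2 ∧ t = k.1.1 := by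
  rw [PySem.List.foldl_ite_eq_foldl_filter]
  rw [PySem.Set.mem_foldl_add]
  constructor
  · rintro (h | ⟨p, hp, rfl⟩)
    · exact absurd h (by simp [PySem.Set.empty])
    · exact ⟨p, (List.mem_filter.mp hp).1, by simpa using (List.mem_filter.mp hp).2, rfl⟩
  · rintro ⟨p, hp, h4, rfl⟩
    exact Or.inr ⟨p, List.mem_filter.mpr ⟨hp, by simpa using h4⟩, rfl⟩

-- the global pair count of (t, s) is the per-term count of s among t's normalized translations
lemma pvPairCount (triples : List (String × String × String)) (t s : String) :
    (triples.map (fun r => (r.1, pvNormKey r.2.2))).count (t, s)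
      = (((triples.filter (fun r => r.1 == t)).map (fun r => pvNormKey r.2.2)).count s) := by
  rw [List.count_eq_countP, List.countP_map, List.count_eq_countP, List.countP_map,
      List.countP_filter]
  apply List.countP_congr
  intro r _
  simp only [Function.comp_apply, beq_iff_eq, Bool.and_eq_true, Prod.mk.injEq]
  exact and_comm

-- B's set-membership test agrees with A's dominant-count test, term by term
lemma pvCounterVals (L : List String) :
    (PySem.Dict.counter L).values = (PySem.Set.ofList L).map (fun k => ((L.count k : Int))) := by
  simp only [PySem.Dict.values, PySem.Dict.items_counter, List.map_map]; rfl

-- the dominant-count test, stated for an abstract pair list P and per-term list L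
lemma pvExIff (P : List (String × String)) (L : List String) (t : String)
    (hmem : ∀ s, (t, s) ∈ P ↔ s ∈ L)
    (hcount : ∀ s, P.count (t, s) = L.count s) :
    (∃ k ∈ (PySem.Dict.counter P).items, 4 ≤ k.2 ∧ t = k.1.1)
      ↔ (∃ v ∈ (PySem.Set.ofList L).map (fun s => ((L.count s : Int))), 4 ≤ v) := by
  constructor
  · rintro ⟨k, hk, h4, ht⟩
    rw [PySem.Dict.items_counter] at hk
    obtain ⟨p, hp, hpk⟩ := List.mem_map.mp hk
    have hk1 : k.1 = p := by rw [← hpk]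
    have hk2 : k.2 = (P.count p : Int) := by rw [← hpk]
    have hp2 : p = (t, p.2) := by rw [ht, hk1]
    have hpP : p ∈ P := (PySem.Set.mem_ofList _ _).mp hp
    have hsL : p.2 ∈ L := (hmem p.2).mp (by rw [← hp2]; exact hpP)
    refine ⟨(L.count p.2 : Int),
      List.mem_map.mpr ⟨p.2, (PySem.Set.mem_ofList _ _).mpr hsL, rfl⟩, ?_⟩
    rw [← hcount p.2, ← hp2, ← hk2]
    exact h4
  · rintro ⟨v, hv, h4⟩
    obtain ⟨s, hs, hsv⟩ := List.mem_map.mp hv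
    have hsL : s ∈ L := (PySem.Set.mem_ofList _ _).mp hs
    have hpP : (t, s) ∈ P := (hmem s).mpr hsL
    refine ⟨((t, s), (P.count (t, s) : Int)), ?_, ?_, rfl⟩
    · rw [PySem.Dict.items_counter]
      exact List.mem_map.mpr ⟨(t, s), (PySem.Set.mem_ofList _ _).mpr hpP, rfl⟩
    · rw [hcount s, hsv]
      exact h4

-- B's set-membership test agrees with A's dominant-count test, term by term
lemma pvClassEq (triples : List (String × String × String)) (t : String) :
    PySem.Set.contains ((PySem.Dict.counter (triples.map (fun r => (r.1, pvNormKey r.2.2)))).items.foldl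
        (fun s p => if 4 ≤ p.2 then PySem.Set.add s p.1.1 else s) PySem.Set.empty) t
      = decide (4 ≤ pvMaxInt ((PySem.Dict.counter
          ((triples.filter (fun r => r.1 == t)).map (fun r => pvNormKey r.2.2))).values)) := by
  have hmem : ∀ s, (t, s) ∈ triples.map (fun r => (r.1, pvNormKey r.2.2))
      ↔ s ∈ (triples.filter (fun r => r.1 == t)).map (fun r => pvNormKey r.2.2) := by
    intro s
    constructor
    · intro h
      obtain ⟨r, hr, hrp⟩ := List.mem_map.mp h
      rw [Prod.mk.injEq] at hrp
      exact List.mem_map.mpr ⟨r, List.mem_filter.mpr ⟨hr, by simp [hrp.1]⟩, hrp.2⟩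
    · intro h
      obtain ⟨r, hr, hrs⟩ := List.mem_map.mp h
      have hr1 : r.1 = t := by simpa using (List.mem_filter.mp hr).2
      exact List.mem_map.mpr ⟨r, (List.mem_filter.mp hr).1, by rw [hr1, hrs]⟩
  have hiff : (t ∈ ((PySem.Dict.counter (triples.map (fun r => (r.1, pvNormKey r.2.2)))).items.foldl
        (fun s p => if 4 ≤ p.2 then PySem.Set.add s p.1.1 else s) PySem.Set.empty))
      ↔ (4 ≤ pvMaxInt ((PySem.Dict.counter
          ((triples.filter (fun r => r.1 == t)).map (fun r => pvNormKey r.2.2))).values)) := by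
    rw [pvConsensusSetMem, pvMaxGe, pvCounterVals]
    exact pvExIff _ _ t hmem (fun s => pvPairCount triples t s)
  rw [← PySem.Set.contains_iff] at hiff
  rw [← Bool.decide_coe (PySem.Set.contains _ t)]
  exact decide_eq_decide.mpr hiff

-- ===== VERDICT =====
set_option maxHeartbeats 1000000 in
theorem analyze_consensus_spec : Claim_equal_analyze_consensus := by
  intro all_terms _
  unfold Spec_analyze_consensus
  simp only [analyze_consensus, analyze_consensus_alt]
  rw [pvGroupFlat]
  set triples := all_terms.flatMap (fun p => p.2.map (fun q => (q.1, p.1, q.2))) with htr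
  set S := ((PySem.Dict.counter (triples.map (fun r => (r.1, pvNormKey r.2.2)))).items.foldl
      (fun s p => if 4 ≤ p.2 then PySem.Set.add s p.1.1 else s) PySem.Set.empty) with hS
  -- split both routing folds into two filtered folds
  have hrA := pvRouteSplit
      (c := fun q : String × List (String × String) =>
        4 ≤ pvMaxInt (((q.2.foldl (fun n q => n.modify (pvNormKey q.2) [] (fun v => v ++ [(q.1, q.2)])) PySem.Dict.empty)).values.map (fun v => PySem.List.len v)))
      (f := fun (d : PySem.Dict String (List (String × String))) q => d.insert q.1 q.2)
      (g := fun (d : PySem.Dict String (List (String × String))) q => d.insert q.1 q.2)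
      ((pvGroup triples).items) PySem.Dict.empty PySem.Dict.empty
  have hrB := pvRouteSplit
      (c := fun r : String × String × String => PySem.Set.contains S r.1 = true)
      (f := fun (d : PySem.Dict String (List (String × String))) r => d.modify r.1 [] (fun v => v ++ [r.2]))
      (g := fun (d : PySem.Dict String (List (String × String))) r => d.modify r.1 [] (fun v => v ++ [r.2]))
      triples PySem.Dict.empty PySem.Dict.empty
  rw [hrA, hrB]
  have hnodup := pvGroupNodup (κ := String) (ν := String × String) triples
  -- A's per-item condition = B's set membership of the item's key
  have hcond : ∀ q ∈ (pvGroup triples).items,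
      decide (4 ≤ pvMaxInt (((q.2.foldl (fun n r => n.modify (pvNormKey r.2) [] (fun v => v ++ [(r.1, r.2)])) PySem.Dict.empty)).values.map (fun v => PySem.List.len v)))
        = PySem.Set.contains S q.1 := by
    intro q hq
    have hgetD : (pvGroup triples).getD q.1 [] = q.2 :=
      PySem.Dict.getD_of_mem_items _ hq hnodup []
    have hfilter : q.2 = (triples.filter (fun r => r.1 == q.1)).map (fun r => r.2) := by
      rw [← hgetD]
      unfold pvGroup
      rw [PySem.Dict.getD_foldl_modify_append]
      simp [PySem.Dict.getD_empty]
    have hmm : q.2.map (fun r => pvNormKey r.2)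
        = (triples.filter (fun r => r.1 == q.1)).map (fun r => pvNormKey r.2.2) := by
      rw [hfilter, List.map_map]; rfl
    rw [show (q.2.foldl (fun n r => n.modify (pvNormKey r.2) [] (fun v => v ++ [(r.1, r.2)])) PySem.Dict.empty)
          = (q.2.foldl (fun n r => n.modify (pvNormKey r.2) [] (fun v => v ++ [(r.1, r.2)])) PySem.Dict.empty) from rfl]
    rw [pvValsEq q.2, hmm, ← pvClassEq triples q.1, hS]
  -- component-wise equality of the resulting items lists
  apply Prod.ext
  · -- consensus component
    show (((pvGroup triples).items.filter _).foldl (fun d q => d.insert q.1 q.2) PySem.Dict.empty).items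
        = ((triples.filter _).foldl (fun d r => d.modify r.1 [] (fun v => v ++ [r.2])) PySem.Dict.empty).items
    have hA : ((pvGroup triples).items.filter (fun q =>
        decide (4 ≤ pvMaxInt (((q.2.foldl (fun n r => n.modify (pvNormKey r.2) [] (fun v => v ++ [(r.1, r.2)])) PySem.Dict.empty)).values.map (fun v => PySem.List.len v)))))
        = (pvGroup triples).items.filter (fun q => PySem.Set.contains S q.1) :=
      List.filter_congr (fun q hq => hcond q hq)
    rw [hA]
    have hkeysnd : (((pvGroup triples).items.filter (fun q => PySem.Set.contains S q.1)).map Prod.fst).Nodup := by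
      have : ((pvGroup triples).items.filter (fun q => PySem.Set.contains S q.1)).map Prod.fst
          |>.Sublist ((pvGroup triples).items.map Prod.fst) :=
        ((pvGroup triples).items.filter_sublist (p := fun q => PySem.Set.contains S q.1)).map Prod.fst
      exact this.nodup hnodup
    have hins := PySem.Dict.items_foldl_insert_fresh
        ((pvGroup triples).items.filter (fun q => PySem.Set.contains S q.1)) Prod.fst Prod.snd PySem.Dict.empty
        (fun a _ => PySem.Dict.contains_empty _) hkeysnd
    rw [hins]
    have hBfilter : triples.filter (fun r => decide (PySem.Set.contains S r.1 = true))
        = triples.filter (fun r => PySem.Set.contains S r.1) := by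
      simp
    rw [hBfilter]
    have := pvGroupFilterItems (fun t => PySem.Set.contains S t) triples
    unfold pvGroup at this
    rw [this]
    simp [pvGroup, PySem.Dict.empty]
  · -- variance component
    show (((pvGroup triples).items.filter _).foldl (fun d q => d.insert q.1 q.2) PySem.Dict.empty).items
        = ((triples.filter _).foldl (fun d r => d.modify r.1 [] (fun v => v ++ [r.2])) PySem.Dict.empty).items
    have hA : ((pvGroup triples).items.filter (fun q =>
        !decide (4 ≤ pvMaxInt (((q.2.foldl (fun n r => n.modify (pvNormKey r.2) [] (fun v => v ++ [(r.1, r.2)])) PySem.Dict.empty)).values.map (fun v => PySem.List.len v)))))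
        = (pvGroup triples).items.filter (fun q => !PySem.Set.contains S q.1) :=
      List.filter_congr (fun q hq => by rw [hcond q hq])
    rw [hA]
    have hkeysnd : (((pvGroup triples).items.filter (fun q => !PySem.Set.contains S q.1)).map Prod.fst).Nodup := by
      have : ((pvGroup triples).items.filter (fun q => !PySem.Set.contains S q.1)).map Prod.fst
          |>.Sublist ((pvGroup triples).items.map Prod.fst) :=
        ((pvGroup triples).items.filter_sublist (p := fun q => !PySem.Set.contains S q.1)).map Prod.fst
      exact this.nodup hnodup
    have hins := PySem.Dict.items_foldl_insert_fresh
        ((pvGroup triples).items.filter (fun q => !PySem.Set.contains S q.1)) Prod.fst Prod.snd PySem.Dict.empty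
        (fun a _ => PySem.Dict.contains_empty _) hkeysnd
    rw [hins]
    have hBfilter : triples.filter (fun r => !decide (PySem.Set.contains S r.1 = true))
        = triples.filter (fun r => !PySem.Set.contains S r.1) := by
      simp
    rw [hBfilter]
    have := pvGroupFilterItems (fun t => !PySem.Set.contains S t) triples
    unfold pvGroup at this
    rw [this]
    simp [pvGroup, PySem.Dict.empty]
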